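-- pv_equiv track=rewrite | github.com/DavidM0808/CSC384_Puzzles | checkers.py | consecutive_jumps_down
-- ===== SOURCE A (Python) =====
-- import copy
--
-- def piece_left_down_jump_is_possible(board, x_cord, y_cord, piece):
--     if y_cord < len(board) - 1:
--         if x_cord > 0:
--             if piece == 'R':  # The piece is a red king
--                 if board[y_cord + 1][x_cord - 1] == 'b' or board[y_cord + 1][x_cord - 1] == 'B':
--                     if y_cord + 2 <= len(board) - 1 and x_cord - 2 >= 0 and board[y_cord + 2][x_cord - 2] == '.':
--                         return True
--             else:
--                 if board[y_cord + 1][x_cord - 1] == 'r' or board[y_cord + 1][x_cord - 1] == 'R':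
--                     if y_cord + 2 <= len(board) - 1 and x_cord - 2 >= 0 and board[y_cord + 2][x_cord - 2] == '.':
--                         return True
--
--     return False
--
-- def piece_right_down_jump_is_possible(board, x_cord, y_cord, piece):
--     if y_cord < len(board) - 1:
--         if x_cord < len(board) - 1:
--             if piece == 'R':
--                 if board[y_cord + 1][x_cord + 1] == 'b' or board[y_cord + 1][x_cord + 1] == 'B':
--                     if y_cord + 2 <= len(board) - 1 and x_cord + 2 <= len(board) - 1 and \
--                             board[y_cord + 2][x_cord + 2] == '.':
--                         return True
--             else:
--                 if board[y_cord + 1][x_cord + 1] == 'r' or board[y_cord + 1][x_cord + 1] == 'R':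
--                     if y_cord + 2 <= len(board) - 1 and x_cord + 2 <= len(board) - 1 and \
--                             board[y_cord + 2][x_cord + 2] == '.':
--                         return True
--
--     return False
--
-- def jump_left_down(board, x_cord, y_cord, piece):
--     result = copy.deepcopy(board)
--
--     if y_cord + 2 == len(board) - 1 and piece == 'b':  # The black piece reached the bottom row
--         result[y_cord + 2][x_cord - 2] = 'B'
--     else:
--         result[y_cord + 2][x_cord - 2] = piece
--
--     result[y_cord + 1][x_cord - 1] = '.'  # The red piece is captured
--     result[y_cord][x_cord] = '.'  # The original black piece has moved
--
--     return result
--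
-- def jump_right_down(board, x_cord, y_cord, piece):
--     result = copy.deepcopy(board)
--
--     if y_cord + 2 == len(board) - 1 and piece == 'b':  # The red piece reached the top row
--         result[y_cord + 2][x_cord + 2] = 'B'
--     else:
--         result[y_cord + 2][x_cord + 2] = piece
--
--     result[y_cord + 1][x_cord + 1] = '.'  # The red piece is captured
--     result[y_cord][x_cord] = '.'  # The original black piece has moved
--
--     return result
--
-- def consecutive_jumps_down(board, x_cord, y_cord, piece):
--     new_board = copy.deepcopy(board)
--
--     while piece_left_down_jump_is_possible(new_board, x_cord, y_cord, piece) or \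
--             piece_right_down_jump_is_possible(new_board, x_cord, y_cord, piece):
--
--         if piece_left_down_jump_is_possible(new_board, x_cord, y_cord, piece):
--             new_board = jump_left_down(new_board, x_cord, y_cord, piece)
--             x_cord -= 2
--             y_cord += 2
--
--         elif piece_right_down_jump_is_possible(new_board, x_cord, y_cord, piece):
--             new_board = jump_right_down(new_board, x_cord, y_cord, piece)
--             x_cord += 2
--             y_cord += 2
--
--     return new_board
-- ===== SOURCE B (Python) =====
-- import copy
--
-- def consecutive_jumps_down(board, x_cord, y_cord, piece):
--     # Read-only simulation over the original board (each feasibility check only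
--     # reads rows below the current one, which earlier jumps never touch),
--     # then apply all captures to a single deepcopy at the end.
--     n = len(board)
--     enemies = ('b', 'B') if piece == 'R' else ('r', 'R')
--     captures = []
--     x, y = x_cord, y_cord
--     while True:
--         if y < n - 1 and x > 0 and board[y + 1][x - 1] in enemies \
--                 and y + 2 <= n - 1 and x - 2 >= 0 and board[y + 2][x - 2] == '.':
--             captures.append((x - 1, y + 1))
--             x -= 2
--             y += 2
--         elif y < n - 1 and x < n - 1 and board[y + 1][x + 1] in enemies \
--                 and y + 2 <= n - 1 and x + 2 <= n - 1 and board[y + 2][x + 2] == '.':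
--             captures.append((x + 1, y + 1))
--             x += 2
--             y += 2
--         else:
--             break
--     result = copy.deepcopy(board)
--     if captures:
--         result[y_cord][x_cord] = '.'
--         for cx, cy in captures:
--             result[cy][cx] = '.'
--         result[y][x] = 'B' if (y == n - 1 and piece == 'b') else piece
--     return result
-- ===== Notes on version B (the rewrite author's own statement) =====
-- stated objective: alternative
-- what changed: B replaces A's mutate-and-recheck loop (which makes a fresh deepcopy of the whole board on every jump) by a read-only simulation over the original board that records the captured squares and the final landing square, followed by a single batch application of all writes to one deepcopy.
import Mathlib
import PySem

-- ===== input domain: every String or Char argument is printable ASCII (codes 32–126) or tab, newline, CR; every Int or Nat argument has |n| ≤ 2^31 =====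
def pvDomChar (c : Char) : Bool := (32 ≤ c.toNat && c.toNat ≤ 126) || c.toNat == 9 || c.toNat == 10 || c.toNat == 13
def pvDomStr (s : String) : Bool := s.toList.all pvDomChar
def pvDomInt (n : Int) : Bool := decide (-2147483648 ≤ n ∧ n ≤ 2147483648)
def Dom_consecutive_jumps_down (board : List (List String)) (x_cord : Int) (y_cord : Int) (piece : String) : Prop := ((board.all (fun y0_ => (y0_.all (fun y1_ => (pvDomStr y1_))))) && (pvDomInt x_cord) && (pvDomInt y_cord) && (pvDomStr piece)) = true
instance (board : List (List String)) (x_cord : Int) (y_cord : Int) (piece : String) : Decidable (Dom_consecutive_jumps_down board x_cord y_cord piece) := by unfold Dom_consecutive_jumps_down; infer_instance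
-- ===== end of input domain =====

-- B replaces A's mutate-and-recheck loop (a fresh deepcopy per jump) by a read-only
-- simulation over the original board followed by one batch application to a single copy
-- (objective: alternative decomposition; equivalence of the RETURN value is proved on Pre_).

-- ===== PORT A =====
-- board[i][j] (total form of the read; Pre_ admits only inputs where Python's read succeeds when reached)
def pvCellA (b : List (List String)) (i j : Int) : String :=
  PySem.List.pyGetD (PySem.List.pyGetD b i []) j ""

-- result[i][j] = v
def pvSetA (b : List (List String)) (i j : Int) (v : String) : List (List String) :=
  PySem.List.pySetD b i (PySem.List.pySetD (PySem.List.pyGetD b i []) j v)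

def piece_left_down_jump_is_possible (board : List (List String)) (x_cord y_cord : Int) (piece : String) : Bool :=
  if y_cord < (board.length : Int) - 1 then
    if 0 < x_cord then
      if piece == "R" then
        if pvCellA board (y_cord+1) (x_cord-1) == "b" || pvCellA board (y_cord+1) (x_cord-1) == "B" then
          if decide (y_cord + 2 ≤ (board.length : Int) - 1) && decide (0 ≤ x_cord - 2) &&
              (pvCellA board (y_cord+2) (x_cord-2) == ".") then true else false
        else false
      else
        if pvCellA board (y_cord+1) (x_cord-1) == "r" || pvCellA board (y_cord+1) (x_cord-1) == "R" then
          if decide (y_cord + 2 ≤ (board.length : Int) - 1) && decide (0 ≤ x_cord - 2) &&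
              (pvCellA board (y_cord+2) (x_cord-2) == ".") then true else false
        else false
    else false
  else false

def piece_right_down_jump_is_possible (board : List (List String)) (x_cord y_cord : Int) (piece : String) : Bool :=
  if y_cord < (board.length : Int) - 1 then
    if x_cord < (board.length : Int) - 1 then
      if piece == "R" then
        if pvCellA board (y_cord+1) (x_cord+1) == "b" || pvCellA board (y_cord+1) (x_cord+1) == "B" then
          if decide (y_cord + 2 ≤ (board.length : Int) - 1) && decide (x_cord + 2 ≤ (board.length : Int) - 1) &&
              (pvCellA board (y_cord+2) (x_cord+2) == ".") then true else false
        else false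
      else
        if pvCellA board (y_cord+1) (x_cord+1) == "r" || pvCellA board (y_cord+1) (x_cord+1) == "R" then
          if decide (y_cord + 2 ≤ (board.length : Int) - 1) && decide (x_cord + 2 ≤ (board.length : Int) - 1) &&
              (pvCellA board (y_cord+2) (x_cord+2) == ".") then true else false
        else false
    else false
  else false

def jump_left_down (board : List (List String)) (x_cord y_cord : Int) (piece : String) : List (List String) :=
  let result := board   -- copy.deepcopy
  let result := if decide (y_cord + 2 = (board.length : Int) - 1) && piece == "b"
      then pvSetA result (y_cord+2) (x_cord-2) "B"
      else pvSetA result (y_cord+2) (x_cord-2) piece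
  let result := pvSetA result (y_cord+1) (x_cord-1) "."
  pvSetA result y_cord x_cord "."

def jump_right_down (board : List (List String)) (x_cord y_cord : Int) (piece : String) : List (List String) :=
  let result := board   -- copy.deepcopy
  let result := if decide (y_cord + 2 = (board.length : Int) - 1) && piece == "b"
      then pvSetA result (y_cord+2) (x_cord+2) "B"
      else pvSetA result (y_cord+2) (x_cord+2) piece
  let result := pvSetA result (y_cord+1) (x_cord+1) "."
  pvSetA result y_cord x_cord "."

-- A's while loop; the fuel only bounds the number of iterations (each one increases
-- y_cord by 2 while the guard needs y_cord < len-1; on Dom y_cord ≥ -2^31, so it never runs out)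
def pvALoop : Nat → List (List String) → Int → Int → String → List (List String)
  | 0, nb, _, _, _ => nb
  | Nat.succ fuel, nb, x, y, p =>
    if piece_left_down_jump_is_possible nb x y p || piece_right_down_jump_is_possible nb x y p then
      if piece_left_down_jump_is_possible nb x y p then
        pvALoop fuel (jump_left_down nb x y p) (x - 2) (y + 2) p
      else if piece_right_down_jump_is_possible nb x y p then
        pvALoop fuel (jump_right_down nb x y p) (x + 2) (y + 2) p
      else nb
    else nb

def consecutive_jumps_down (board : List (List String)) (x_cord : Int) (y_cord : Int) (piece : String) : List (List String) :=
  pvALoop (board.length + 4294967296) board x_cord y_cord piece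

-- ===== PORT B =====
-- B's own board[i][j] read and board[i][j] = v write
def pvCellB (b : List (List String)) (i j : Int) : String :=
  PySem.List.pyGetD (PySem.List.pyGetD b i []) j ""

def pvSetB (b : List (List String)) (i j : Int) (v : String) : List (List String) :=
  PySem.List.pySetD b i (PySem.List.pySetD (PySem.List.pyGetD b i []) j v)

-- the two feasibility conditions of Source B's while loop (es = the 'enemies' pair)
def pvBLeft (board : List (List String)) (x y : Int) (es : String × String) : Bool :=
  decide (y < (board.length : Int) - 1) && decide (0 < x) &&
    (pvCellB board (y+1) (x-1) == es.1 || pvCellB board (y+1) (x-1) == es.2) &&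
    decide (y + 2 ≤ (board.length : Int) - 1) && decide (0 ≤ x - 2) &&
    (pvCellB board (y+2) (x-2) == ".")

def pvBRight (board : List (List String)) (x y : Int) (es : String × String) : Bool :=
  decide (y < (board.length : Int) - 1) && decide (x < (board.length : Int) - 1) &&
    (pvCellB board (y+1) (x+1) == es.1 || pvCellB board (y+1) (x+1) == es.2) &&
    decide (y + 2 ≤ (board.length : Int) - 1) && decide (x + 2 ≤ (board.length : Int) - 1) &&
    (pvCellB board (y+2) (x+2) == ".")

-- Source B's read-only simulation loop: collects the captured squares, returns final (x, y)
def pvBSim : Nat → List (List String) → Int → Int → String × String → List (Int × Int) →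
    List (Int × Int) × Int × Int
  | 0, _, x, y, _, acc => (acc, x, y)
  | Nat.succ fuel, board, x, y, es, acc =>
    if pvBLeft board x y es then pvBSim fuel board (x - 2) (y + 2) es (acc ++ [(x - 1, y + 1)])
    else if pvBRight board x y es then pvBSim fuel board (x + 2) (y + 2) es (acc ++ [(x + 1, y + 1)])
    else (acc, x, y)

def consecutive_jumps_down_alt (board : List (List String)) (x_cord : Int) (y_cord : Int) (piece : String) : List (List String) :=
  let es := if piece == "R" then ("b", "B") else ("r", "R")
  let r := pvBSim (board.length + 4294967296) board x_cord y_cord es []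
  if r.1.isEmpty then board   -- copy.deepcopy; no jump happened
  else
    let result := pvSetB board y_cord x_cord "."
    let result := r.1.foldl (fun acc q => pvSetB acc q.2 q.1 ".") result
    pvSetB result r.2.2 r.2.1
      (if decide (r.2.2 = (board.length : Int) - 1) && piece == "b" then "B" else piece)

-- ===== PRECONDITION & SPEC =====
-- board[i][j] as an Option (none exactly where Python's read raises) — used only by Pre_
def pvPreCell (b : List (List String)) (i j : Int) : Option String :=
  (PySem.List.pyGet? b i).bind fun r => PySem.List.pyGet? r j

def pvPreEnemy (piece c : String) : Bool :=
  if piece == "R" then c == "b" || c == "B" else c == "r" || c == "R"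

-- "the left feasibility check evaluates to False, every read it reaches succeeding"
def pvLeftCheckFalse (board : List (List String)) (x y : Int) (piece : String) : Bool :=
  !(decide (y < (board.length : Int) - 1) && decide (0 < x)) ||
    match pvPreCell board (y+1) (x-1) with
    | none => false
    | some c =>
      !(pvPreEnemy piece c) ||
      !(decide (y + 2 ≤ (board.length : Int) - 1) && decide (0 ≤ x - 2)) ||
      (match pvPreCell board (y+2) (x-2) with
       | none => false
       | some d => d != ".")

def pvRightCheckFalse (board : List (List String)) (x y : Int) (piece : String) : Bool :=
  !(decide (y < (board.length : Int) - 1) && decide (x < (board.length : Int) - 1)) ||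
    match pvPreCell board (y+1) (x+1) with
    | none => false
    | some c =>
      !(pvPreEnemy piece c) ||
      !(decide (y + 2 ≤ (board.length : Int) - 1) && decide (x + 2 ≤ (board.length : Int) - 1)) ||
      (match pvPreCell board (y+2) (x+2) with
       | none => false
       | some d => d != ".")

-- Pre_ restricts to the natural domain of the move generator — a square board with the moving
-- piece at an on-board coordinate — and additionally admits every input whose first feasibility
-- checks fail safely (then no jump happens and A returns a plain copy); it excludes malformed
-- inputs (ragged boards, negative or off-board coordinates) from which a jump chain starts: there
-- A's reads wrap around via Python negative indexing into its own in-place mutations, or raise.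
def Pre_consecutive_jumps_down (board : List (List String)) (x_cord : Int) (y_cord : Int) (piece : String) : Prop :=
  ((pvLeftCheckFalse board x_cord y_cord piece && pvRightCheckFalse board x_cord y_cord piece) ||
   (board.all (fun r => r.length == board.length) &&
    decide (0 ≤ x_cord) && decide (x_cord < (board.length : Int)) &&
    decide (0 ≤ y_cord) && decide (y_cord < (board.length : Int)))) = true

instance (board : List (List String)) (x_cord : Int) (y_cord : Int) (piece : String) : Decidable (Pre_consecutive_jumps_down board x_cord y_cord piece) := by unfold Pre_consecutive_jumps_down; infer_instance

def pvWitness_consecutive_jumps_down : List (List String) × Int × Int × String :=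
  ([[".", ".", "b", "."], [".", "r", ".", "."], [".", ".", ".", "."], [".", ".", ".", "."]], 2, 0, "b")

def Spec_consecutive_jumps_down (board : List (List String)) (x_cord : Int) (y_cord : Int) (piece : String) (out : List (List String)) : Prop := out = consecutive_jumps_down_alt board x_cord y_cord piece
instance (board : List (List String)) (x_cord : Int) (y_cord : Int) (piece : String) (out : List (List String)) : Decidable (Spec_consecutive_jumps_down board x_cord y_cord piece out) := by unfold Spec_consecutive_jumps_down; infer_instance

-- ===== CLAIM (what is proved, stated in full; the proofs are below) =====
def Claim_equal_consecutive_jumps_down : Prop := ∀ (board : List (List String)) (x_cord : Int) (y_cord : Int) (piece : String), Dom_consecutive_jumps_down board x_cord y_cord piece → Pre_consecutive_jumps_down board x_cord y_cord piece → Spec_consecutive_jumps_down board x_cord y_cord piece (consecutive_jumps_down board x_cord y_cord piece)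

-- ===== LEMMAS AND PROOFS =====

-- write normal form used by the proofs: b[i][j] = v with Nat indices
def pvNSet (b : List (List String)) (i j : Nat) (v : String) : List (List String) :=
  b.set i ((b.getD i []).set j v)

theorem pvSetA_natCast (b : List (List String)) (i j : Nat) (v : String) :
    pvSetA b (i : Int) (j : Int) v = pvNSet b i j v := by
  simp [pvSetA, pvNSet, PySem.List.pySetD_natCast, PySem.List.pyGetD_natCast]

theorem pvSetB_natCast (b : List (List String)) (i j : Nat) (v : String) :
    pvSetB b (i : Int) (j : Int) v = pvNSet b i j v := by
  simp [pvSetB, pvNSet, PySem.List.pySetD_natCast, PySem.List.pyGetD_natCast]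

theorem pvCellA_natCast (b : List (List String)) (i j : Nat) :
    pvCellA b (i : Int) (j : Int) = (b.getD i []).getD j "" := by
  simp [pvCellA, PySem.List.pyGetD_natCast]

theorem pvCellB_eq_A (b : List (List String)) (i j : Int) : pvCellB b i j = pvCellA b i j := rfl

theorem length_pvNSet (b : List (List String)) (i j : Nat) (v : String) :
    (pvNSet b i j v).length = b.length := by simp [pvNSet]

theorem getD_pvNSet_ne (b : List (List String)) (i j k : Nat) (v : String) (h : k ≠ i) :
    (pvNSet b i j v).getD k [] = b.getD k [] := by
  rw [pvNSet, List.getD_eq_getElem?_getD, List.getElem?_set, if_neg (Ne.symm h),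
    ← List.getD_eq_getElem?_getD]

theorem getD_pvNSet_self (b : List (List String)) (i j : Nat) (v : String) (hi : i < b.length) :
    (pvNSet b i j v).getD i [] = (b.getD i []).set j v := by
  rw [pvNSet, List.getD_eq_getElem?_getD, List.getElem?_set, if_pos rfl, if_pos hi]
  rfl

theorem pvNSet_oor (b : List (List String)) (i j : Nat) (v : String) (hi : b.length ≤ i) :
    pvNSet b i j v = b := by
  rw [pvNSet, List.set_eq_of_length_le hi]

theorem rowlen_pvNSet (b : List (List String)) (i j k : Nat) (v : String) :
    ((pvNSet b i j v).getD k []).length = (b.getD k []).length := by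
  by_cases h : k = i
  · subst h
    by_cases hi : k < b.length
    · rw [getD_pvNSet_self _ _ _ _ hi]; simp
    · rw [pvNSet_oor _ _ _ _ (by omega)]
  · rw [getD_pvNSet_ne _ _ _ _ _ h]

theorem pvNSet_comm (b : List (List String)) (i j i' j' : Nat) (v v' : String) (h : i ≠ i') :
    pvNSet (pvNSet b i j v) i' j' v' = pvNSet (pvNSet b i' j' v') i j v := by
  simp only [pvNSet]
  rw [show (b.set i ((b.getD i []).set j v)).getD i' [] = b.getD i' [] from by
        rw [List.getD_eq_getElem?_getD, List.getElem?_set, if_neg h, ← List.getD_eq_getElem?_getD],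
      show (b.set i' ((b.getD i' []).set j' v')).getD i [] = b.getD i [] from by
        rw [List.getD_eq_getElem?_getD, List.getElem?_set, if_neg (Ne.symm h),
          ← List.getD_eq_getElem?_getD],
      List.set_comm _ _ h]

theorem pvNSet_overwrite (b : List (List String)) (i j : Nat) (v v' : String) :
    pvNSet (pvNSet b i j v) i j v' = pvNSet b i j v' := by
  by_cases hi : i < b.length
  · conv_lhs => rw [pvNSet]
    rw [getD_pvNSet_self _ _ _ _ hi, List.set_set, pvNSet, List.set_set]
    rfl
  · rw [pvNSet_oor b i j v (by omega)]

theorem pvNSet_id (b : List (List String)) (i j : Nat) (v : String) (hi : i < b.length)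
    (hj : j < (b.getD i []).length) (hv : (b.getD i []).getD j "" = v) : pvNSet b i j v = b := by
  rw [pvNSet, ← hv, List.getD_eq_getElem (b.getD i []) "" hj, List.set_getElem_self,
    List.getD_eq_getElem b [] hi, List.set_getElem_self]

-- a cell strictly below the rows an A-jump has touched reads the same on both boards
theorem pvCell_agree (board nb : List (List String)) (yn : Nat)
    (hlen : nb.length = board.length)
    (hrows : ∀ k : Nat, yn < k → nb.getD k [] = board.getD k [])
    (i j : Int) (hi : (yn : Int) < i) : pvCellA nb i j = pvCellA board i j := by
  have h0 : (0 : Int) ≤ i := by omega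
  rw [pvCellA, pvCellA, PySem.List.pyGetD_of_nonneg nb [] h0,
    PySem.List.pyGetD_of_nonneg board [] h0, hrows i.toNat (by omega)]

-- A's feasibility checks on its mutated board coincide with B's on the original board
theorem pv_guard_left (board nb : List (List String)) (xn yn : Nat) (p : String)
    (es : String × String) (hes : es = if p == "R" then ("b", "B") else ("r", "R"))
    (hlen : nb.length = board.length)
    (hrows : ∀ k : Nat, yn < k → nb.getD k [] = board.getD k []) :
    piece_left_down_jump_is_possible nb (xn : Int) (yn : Int) p = pvBLeft board (xn : Int) (yn : Int) es := by
  have c1 := pvCell_agree board nb yn hlen hrows ((yn : Int) + 1) ((xn : Int) - 1) (by omega)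
  have c2 := pvCell_agree board nb yn hlen hrows ((yn : Int) + 2) ((xn : Int) - 2) (by omega)
  rw [Bool.eq_iff_iff]
  subst hes
  by_cases hR : p = "R" <;>
  · simp only [piece_left_down_jump_is_possible, pvBLeft, pvCellB_eq_A, hlen, c1, c2, hR]
    split_ifs <;> simp_all [Bool.and_eq_true, Bool.or_eq_true, decide_eq_true_eq, beq_iff_eq] <;> tauto

theorem pv_guard_right (board nb : List (List String)) (xn yn : Nat) (p : String)
    (es : String × String) (hes : es = if p == "R" then ("b", "B") else ("r", "R"))
    (hlen : nb.length = board.length)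
    (hrows : ∀ k : Nat, yn < k → nb.getD k [] = board.getD k []) :
    piece_right_down_jump_is_possible nb (xn : Int) (yn : Int) p = pvBRight board (xn : Int) (yn : Int) es := by
  have c1 := pvCell_agree board nb yn hlen hrows ((yn : Int) + 1) ((xn : Int) + 1) (by omega)
  have c2 := pvCell_agree board nb yn hlen hrows ((yn : Int) + 2) ((xn : Int) + 2) (by omega)
  rw [Bool.eq_iff_iff]
  subst hes
  by_cases hR : p = "R" <;>
  · simp only [piece_right_down_jump_is_possible, pvBRight, pvCellB_eq_A, hlen, c1, c2, hR]
    split_ifs <;> simp_all [Bool.and_eq_true, Bool.or_eq_true, decide_eq_true_eq, beq_iff_eq] <;> tauto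

-- Source B's loop only ever appends to its accumulator
theorem pv_bsim_acc : ∀ (fuel : Nat) (bd : List (List String)) (x y : Int)
    (es : String × String) (acc : List (Int × Int)),
    pvBSim fuel bd x y es acc =
      (acc ++ (pvBSim fuel bd x y es []).1, (pvBSim fuel bd x y es []).2) := by
  intro fuel
  induction fuel with
  | zero => intro bd x y es acc; simp [pvBSim]
  | succ f ih =>
    intro bd x y es acc
    simp only [pvBSim]
    by_cases h1 : pvBLeft bd x y es = true
    · simp only [h1, if_true]
      rw [ih bd _ _ es (acc ++ [(x - 1, y + 1)]), ih bd _ _ es ([] ++ [(x - 1, y + 1)])]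
      simp
    · simp only [h1]
      by_cases h2 : pvBRight bd x y es = true
      · simp only [h2, if_true, if_false, Bool.false_eq_true]
        rw [ih bd _ _ es (acc ++ [(x + 1, y + 1)]), ih bd _ _ es ([] ++ [(x + 1, y + 1)])]
        simp
      · simp [h1, h2]

theorem pv_bsim_nil (fuel : Nat) (bd : List (List String)) (x y : Int) (es : String × String)
    (h : (pvBSim fuel bd x y es []).1 = []) : (pvBSim fuel bd x y es []).2 = (x, y) := by
  cases fuel with
  | zero => rfl
  | succ f =>
    by_cases h1 : pvBLeft bd x y es = true
    · exfalso
      simp only [pvBSim, h1, if_true] at h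
      rw [pv_bsim_acc] at h
      simp at h
    · have h1' : pvBLeft bd x y es = false := by simpa using h1
      by_cases h2 : pvBRight bd x y es = true
      · exfalso
        simp only [pvBSim, h1', Bool.false_eq_true, if_false, h2, if_true] at h
        rw [pv_bsim_acc] at h
        simp at h
      · have h2' : pvBRight bd x y es = false := by simpa using h2
        simp [pvBSim, h1', h2']

-- the tail of consecutive_jumps_down_alt: one batch application of the recorded writes
def pvApply (p : String) (nb : List (List String)) (sx sy : Int)
    (r : List (Int × Int) × Int × Int) : List (List String) :=
  if r.1.isEmpty then nb
  else
    let result := pvSetB nb sy sx "."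
    let result := r.1.foldl (fun acc q => pvSetB acc q.2 q.1 ".") result
    pvSetB result r.2.2 r.2.1
      (if decide (r.2.2 = (nb.length : Int) - 1) && p == "b" then "B" else p)

theorem pv_alt_eq (board : List (List String)) (x y : Int) (p : String) :
    consecutive_jumps_down_alt board x y p =
      pvApply p board x y (pvBSim (board.length + 4294967296) board x y
        (if p == "R" then ("b", "B") else ("r", "R")) []) := rfl

theorem pv_pyGetD_get? {α : Type} (xs : List α) (i : Int) (d : α) :
    PySem.List.pyGetD xs i d = (PySem.List.pyGet? xs i).getD d := rfl

theorem pv_pyGet?_nil {α : Type} (j : Int) : PySem.List.pyGet? ([] : List α) j = none := by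
  rw [PySem.List.pyGet?_eq_none_iff]; simp [PySem.Raise.InRange]

-- a non-default cell value proves both Python reads succeeded
theorem pv_preCell_of_ne (b : List (List String)) (i j : Int) (h : pvCellA b i j ≠ "") :
    pvPreCell b i j = some (pvCellA b i j) := by
  cases hrow : PySem.List.pyGet? b i with
  | none =>
    exfalso; apply h
    show PySem.List.pyGetD (PySem.List.pyGetD b i []) j "" = ""
    rw [pv_pyGetD_get? b i ([] : List String), hrow]
    show PySem.List.pyGetD ([] : List String) j "" = ""
    rw [pv_pyGetD_get?, pv_pyGet?_nil]
    rfl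
  | some r =>
    cases hcell : PySem.List.pyGet? r j with
    | none =>
      exfalso; apply h
      show PySem.List.pyGetD (PySem.List.pyGetD b i []) j "" = ""
      rw [pv_pyGetD_get? b i ([] : List String), hrow]
      show PySem.List.pyGetD r j "" = ""
      rw [pv_pyGetD_get?, hcell]
      rfl
    | some c =>
      show (PySem.List.pyGet? b i).bind (fun r => PySem.List.pyGet? r j) = some (pvCellA b i j)
      rw [hrow]
      show PySem.List.pyGet? r j = some (pvCellA b i j)
      rw [hcell]
      congr 1
      show c = PySem.List.pyGetD (PySem.List.pyGetD b i []) j ""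
      rw [pv_pyGetD_get? b i ([] : List String), hrow]
      show c = PySem.List.pyGetD r j ""
      rw [pv_pyGetD_get?, hcell]
      rfl

theorem pv_enemy_ne_default (p c : String) (h : pvPreEnemy p c = true) : c ≠ "" := by
  intro he; subst he
  by_cases hR : (p == "R") = true <;> simp [pvPreEnemy, hR] at h

-- the contradiction core: the left check cannot both fail safely and succeed
theorem pv_leftCheck_core (board : List (List String)) (x y : Int) (p : String)
    (h : pvLeftCheckFalse board x y p = true)
    (h1 : y < (board.length : Int) - 1) (h2 : 0 < x)
    (henemy : pvPreEnemy p (pvCellA board (y+1) (x-1)) = true)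
    (h4 : y + 2 ≤ (board.length : Int) - 1) (h5 : 0 ≤ x - 2)
    (hdot : pvCellA board (y+2) (x-2) = ".") : False := by
  have hs1 := pv_preCell_of_ne board (y+1) (x-1) (pv_enemy_ne_default p _ henemy)
  have hs2 := pv_preCell_of_ne board (y+2) (x-2) (by rw [hdot]; simp)
  rw [pvLeftCheckFalse, hs1, hs2] at h
  simp only [h1, h2, h4, h5, henemy, hdot, decide_true, Bool.and_true, Bool.true_and,
    Bool.not_true, Bool.false_or, Bool.or_eq_true, Bool.not_eq_true', decide_eq_false_iff_not] at h
  simp at h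

theorem pv_rightCheck_core (board : List (List String)) (x y : Int) (p : String)
    (h : pvRightCheckFalse board x y p = true)
    (h1 : y < (board.length : Int) - 1) (h2 : x < (board.length : Int) - 1)
    (henemy : pvPreEnemy p (pvCellA board (y+1) (x+1)) = true)
    (h4 : y + 2 ≤ (board.length : Int) - 1) (h5 : x + 2 ≤ (board.length : Int) - 1)
    (hdot : pvCellA board (y+2) (x+2) = ".") : False := by
  have hs1 := pv_preCell_of_ne board (y+1) (x+1) (pv_enemy_ne_default p _ henemy)
  have hs2 := pv_preCell_of_ne board (y+2) (x+2) (by rw [hdot]; simp)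
  rw [pvRightCheckFalse, hs1, hs2] at h
  simp only [h1, h2, h4, h5, henemy, hdot, decide_true, Bool.and_true, Bool.true_and,
    Bool.not_true, Bool.false_or, Bool.or_eq_true, Bool.not_eq_true', decide_eq_false_iff_not] at h
  simp at h

theorem pv_leftFalse_A (board : List (List String)) (x y : Int) (p : String)
    (h : pvLeftCheckFalse board x y p = true) :
    piece_left_down_jump_is_possible board x y p = false := by
  cases hA : piece_left_down_jump_is_possible board x y p
  · rfl
  · exfalso
    rw [piece_left_down_jump_is_possible] at hA
    split_ifs at hA with h1 h2 h3 h4 h5 h6 h7 <;> try simp at hA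
    · rw [Bool.and_eq_true, Bool.and_eq_true] at h5
      obtain ⟨⟨hb1, hb2⟩, hdot⟩ := h5
      exact pv_leftCheck_core board x y p h h1 h2
        (by rw [pvPreEnemy, if_pos h3]; exact h4)
        (of_decide_eq_true hb1) (of_decide_eq_true hb2) (beq_iff_eq.mp hdot)
    · rw [Bool.and_eq_true, Bool.and_eq_true] at h7
      obtain ⟨⟨hb1, hb2⟩, hdot⟩ := h7
      exact pv_leftCheck_core board x y p h h1 h2
        (by rw [pvPreEnemy, if_neg h3]; exact h6)
        (of_decide_eq_true hb1) (of_decide_eq_true hb2) (beq_iff_eq.mp hdot)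

theorem pv_rightFalse_A (board : List (List String)) (x y : Int) (p : String)
    (h : pvRightCheckFalse board x y p = true) :
    piece_right_down_jump_is_possible board x y p = false := by
  cases hA : piece_right_down_jump_is_possible board x y p
  · rfl
  · exfalso
    rw [piece_right_down_jump_is_possible] at hA
    split_ifs at hA with h1 h2 h3 h4 h5 h6 h7 <;> try simp at hA
    · rw [Bool.and_eq_true, Bool.and_eq_true] at h5
      obtain ⟨⟨hb1, hb2⟩, hdot⟩ := h5
      exact pv_rightCheck_core board x y p h h1 h2
        (by rw [pvPreEnemy, if_pos h3]; exact h4)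
        (of_decide_eq_true hb1) (of_decide_eq_true hb2) (beq_iff_eq.mp hdot)
    · rw [Bool.and_eq_true, Bool.and_eq_true] at h7
      obtain ⟨⟨hb1, hb2⟩, hdot⟩ := h7
      exact pv_rightCheck_core board x y p h h1 h2
        (by rw [pvPreEnemy, if_neg h3]; exact h6)
        (of_decide_eq_true hb1) (of_decide_eq_true hb2) (beq_iff_eq.mp hdot)

theorem pv_leftFalse_B (board : List (List String)) (x y : Int) (p : String) (es : String × String)
    (hes : es = if p == "R" then ("b", "B") else ("r", "R"))
    (h : pvLeftCheckFalse board x y p = true) : pvBLeft board x y es = false := by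
  cases hB : pvBLeft board x y es
  · rfl
  · exfalso
    simp only [pvBLeft, Bool.and_eq_true, Bool.or_eq_true, decide_eq_true_eq, beq_iff_eq,
      pvCellB_eq_A] at hB
    obtain ⟨⟨⟨⟨⟨h1, h2⟩, hcell⟩, h4⟩, h5⟩, hdot⟩ := hB
    refine pv_leftCheck_core board x y p h h1 h2 ?_ h4 h5 hdot
    subst hes
    by_cases hR : (p == "R") = true <;>
      simp only [pvPreEnemy, hR, if_pos, if_neg, if_true, if_false, Bool.or_eq_true,
        beq_iff_eq] <;> simp [hR] at hcell ⊢ <;> tauto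

theorem pv_rightFalse_B (board : List (List String)) (x y : Int) (p : String) (es : String × String)
    (hes : es = if p == "R" then ("b", "B") else ("r", "R"))
    (h : pvRightCheckFalse board x y p = true) : pvBRight board x y es = false := by
  cases hB : pvBRight board x y es
  · rfl
  · exfalso
    simp only [pvBRight, Bool.and_eq_true, Bool.or_eq_true, decide_eq_true_eq, beq_iff_eq,
      pvCellB_eq_A] at hB
    obtain ⟨⟨⟨⟨⟨h1, h2⟩, hcell⟩, h4⟩, h5⟩, hdot⟩ := hB
    refine pv_rightCheck_core board x y p h h1 h2 ?_ h4 h5 hdot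
    subst hes
    by_cases hR : (p == "R") = true <;>
      simp only [pvPreEnemy, hR, if_pos, if_neg, if_true, if_false, Bool.or_eq_true,
        beq_iff_eq] <;> simp [hR] at hcell ⊢ <;> tauto

theorem pv_main (board : List (List String)) (p : String) (es : String × String)
    (hes : es = if p == "R" then ("b", "B") else ("r", "R"))
    (hsq : ∀ k : Nat, k < board.length → (board.getD k []).length = board.length) :
    ∀ (fuel : Nat) (nb : List (List String)) (xn yn : Nat),
      nb.length = board.length →
      (∀ k : Nat, (nb.getD k []).length = (board.getD k []).length) →
      (∀ k : Nat, yn < k → nb.getD k [] = board.getD k []) →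
      xn < board.length →
      pvALoop fuel nb (xn : Int) (yn : Int) p =
        pvApply p nb (xn : Int) (yn : Int) (pvBSim fuel board (xn : Int) (yn : Int) es []) := by
  intro fuel
  induction fuel with
  | zero => intro nb xn yn hlen hrowlen hrows hx; simp [pvALoop, pvBSim, pvApply]
  | succ f ih =>
    intro nb xn yn hlen hrowlen hrows hx
    have hgl := pv_guard_left board nb xn yn p es hes hlen hrows
    have hgr := pv_guard_right board nb xn yn p es hes hlen hrows
    by_cases hL : pvBLeft board (xn : Int) (yn : Int) es = true
    · -- left jump is taken
      have hfacts : ((yn : Int) < (board.length : Int) - 1 ∧ (0 : Int) < (xn : Int)) ∧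
          ((yn : Int) + 2 ≤ (board.length : Int) - 1 ∧ (0 : Int) ≤ (xn : Int) - 2) ∧
          pvCellA board ((yn : Int) + 2) ((xn : Int) - 2) = "." := by
        simp only [pvBLeft, Bool.and_eq_true, decide_eq_true_eq, Bool.or_eq_true, beq_iff_eq,
          pvCellB_eq_A] at hL
        tauto
      obtain ⟨⟨hf1, hf2⟩, ⟨hf4, hf3⟩, hland⟩ := hfacts
      have hx2 : 2 ≤ xn := by omega
      have hy2 : yn + 2 < board.length := by omega
      have e1 : ((xn : Int) - 2) = ((xn - 2 : Nat) : Int) := by omega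
      have e2 : ((xn : Int) - 1) = ((xn - 1 : Nat) : Int) := by omega
      have e3 : ((yn : Int) + 2) = ((yn + 2 : Nat) : Int) := by omega
      have e4 : ((yn : Int) + 1) = ((yn + 1 : Nat) : Int) := by omega
      set v : String :=
        if decide (((yn + 2 : Nat) : Int) = (nb.length : Int) - 1) && p == "b" then "B" else p
        with hv
      have hjump : jump_left_down nb (xn : Int) (yn : Int) p =
          pvNSet (pvNSet (pvNSet nb (yn+2) (xn-2) v) (yn+1) (xn-1) ".") yn xn "." := by
        rw [jump_left_down]
        rw [← apply_ite (fun w => pvSetA nb ((yn : Int) + 2) ((xn : Int) - 2) w)]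
        rw [e1, e2, e3, e4]
        simp only [pvSetA_natCast]
        rw [← hv]
      have hlen' : (jump_left_down nb (xn : Int) (yn : Int) p).length = board.length := by
        rw [hjump]; simp [length_pvNSet, hlen]
      have hrowlen' : ∀ k : Nat,
          ((jump_left_down nb (xn : Int) (yn : Int) p).getD k []).length =
            (board.getD k []).length := by
        intro k
        rw [hjump, rowlen_pvNSet, rowlen_pvNSet, rowlen_pvNSet]
        exact hrowlen k
      have hrows' : ∀ k : Nat, yn + 2 < k →
          (jump_left_down nb (xn : Int) (yn : Int) p).getD k [] = board.getD k [] := by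
        intro k hk
        rw [hjump, getD_pvNSet_ne _ _ _ _ _ (by omega), getD_pvNSet_ne _ _ _ _ _ (by omega),
          getD_pvNSet_ne _ _ _ _ _ (by omega)]
        exact hrows k (by omega)
      have IH := ih (jump_left_down nb (xn : Int) (yn : Int) p) (xn - 2) (yn + 2)
        hlen' hrowlen' hrows' (by omega)
      have hstep : pvALoop (f + 1) nb (xn : Int) (yn : Int) p =
          pvALoop f (jump_left_down nb (xn : Int) (yn : Int) p) ((xn : Int) - 2) ((yn : Int) + 2) p := by
        simp [pvALoop, hgl, hgr, hL]
      have hsimstep : pvBSim (f + 1) board (xn : Int) (yn : Int) es [] =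
          ((((xn - 1 : Nat) : Int), ((yn + 1 : Nat) : Int)) ::
              (pvBSim f board ((xn - 2 : Nat) : Int) ((yn + 2 : Nat) : Int) es []).1,
            (pvBSim f board ((xn - 2 : Nat) : Int) ((yn + 2 : Nat) : Int) es []).2) := by
        simp only [pvBSim, hL, if_true]
        rw [e1, e2, e3, e4, pv_bsim_acc]
        simp
      rw [hstep, e1, e3, IH, hsimstep]
      by_cases hnil : (pvBSim f board ((xn - 2 : Nat) : Int) ((yn + 2 : Nat) : Int) es []).1 = []
      · have hxy := pv_bsim_nil f board _ _ es hnil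
        simp only [pvApply, hnil, hxy, List.isEmpty_nil, if_true, List.isEmpty_cons,
          Bool.false_eq_true, if_false, List.foldl_cons, List.foldl_nil]
        rw [hjump]
        simp only [pvSetB_natCast]
        rw [← hv]
        rw [pvNSet_comm (pvNSet nb (yn+2) (xn-2) v) (yn+1) (xn-1) yn xn "." "." (by omega)]
        rw [pvNSet_comm nb (yn+2) (xn-2) yn xn v "." (by omega)]
        rw [pvNSet_comm (pvNSet nb yn xn ".") (yn+2) (xn-2) (yn+1) (xn-1) v "." (by omega)]
      · have hne : (pvBSim f board ((xn - 2 : Nat) : Int) ((yn + 2 : Nat) : Int) es []).1.isEmpty = false := by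
          cases hc : (pvBSim f board ((xn - 2 : Nat) : Int) ((yn + 2 : Nat) : Int) es []).1 with
          | nil => exact absurd hc hnil
          | cons a l => rfl
        simp only [pvApply, hne, List.isEmpty_cons, Bool.false_eq_true, if_false,
          List.foldl_cons]
        have hrow_eq : nb.getD (yn + 2) [] = board.getD (yn + 2) [] := hrows (yn + 2) (by omega)
        have hbase : pvSetB (jump_left_down nb (xn : Int) (yn : Int) p)
              ((yn + 2 : Nat) : Int) ((xn - 2 : Nat) : Int) "." =
            pvSetB (pvSetB nb ((yn : Nat) : Int) ((xn : Nat) : Int) ".")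
              ((yn + 1 : Nat) : Int) ((xn - 1 : Nat) : Int) "." := by
          rw [hjump]
          simp only [pvSetB_natCast]
          rw [pvNSet_comm (pvNSet (pvNSet nb (yn+2) (xn-2) v) (yn+1) (xn-1) ".") yn xn
            (yn+2) (xn-2) "." "." (by omega)]
          rw [pvNSet_comm (pvNSet nb (yn+2) (xn-2) v) (yn+1) (xn-1) (yn+2) (xn-2) "." "."
            (by omega)]
          rw [pvNSet_overwrite nb (yn+2) (xn-2) v "."]
          rw [pvNSet_id nb (yn+2) (xn-2) "." (by omega)
            (by rw [hrow_eq]; rw [hsq (yn+2) hy2]; omega)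
            (by
              rw [hrow_eq]
              rw [e1, e3, pvCellA_natCast] at hland
              exact hland)]
          rw [pvNSet_comm nb (yn+1) (xn-1) yn xn "." "." (by omega)]
        rw [hbase, hlen', ← hlen]
    · by_cases hR : pvBRight board (xn : Int) (yn : Int) es = true
      · -- right jump is taken
        have hfacts : ((yn : Int) < (board.length : Int) - 1 ∧ (xn : Int) < (board.length : Int) - 1) ∧
            ((yn : Int) + 2 ≤ (board.length : Int) - 1 ∧ (xn : Int) + 2 ≤ (board.length : Int) - 1) ∧
            pvCellA board ((yn : Int) + 2) ((xn : Int) + 2) = "." := by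
          simp only [pvBRight, Bool.and_eq_true, decide_eq_true_eq, Bool.or_eq_true, beq_iff_eq,
            pvCellB_eq_A] at hR
          tauto
        obtain ⟨⟨hf1, hf2⟩, ⟨hf4, hf3⟩, hland⟩ := hfacts
        have hy2 : yn + 2 < board.length := by omega
        have e1 : ((xn : Int) + 2) = ((xn + 2 : Nat) : Int) := by omega
        have e2 : ((xn : Int) + 1) = ((xn + 1 : Nat) : Int) := by omega
        have e3 : ((yn : Int) + 2) = ((yn + 2 : Nat) : Int) := by omega
        have e4 : ((yn : Int) + 1) = ((yn + 1 : Nat) : Int) := by omega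
        set v : String :=
          if decide (((yn + 2 : Nat) : Int) = (nb.length : Int) - 1) && p == "b" then "B" else p
          with hv
        have hjump : jump_right_down nb (xn : Int) (yn : Int) p =
            pvNSet (pvNSet (pvNSet nb (yn+2) (xn+2) v) (yn+1) (xn+1) ".") yn xn "." := by
          rw [jump_right_down]
          rw [← apply_ite (fun w => pvSetA nb ((yn : Int) + 2) ((xn : Int) + 2) w)]
          rw [e1, e2, e3, e4]
          simp only [pvSetA_natCast]
          rw [← hv]
        have hlen' : (jump_right_down nb (xn : Int) (yn : Int) p).length = board.length := by
          rw [hjump]; simp [length_pvNSet, hlen]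
        have hrowlen' : ∀ k : Nat,
            ((jump_right_down nb (xn : Int) (yn : Int) p).getD k []).length =
              (board.getD k []).length := by
          intro k
          rw [hjump, rowlen_pvNSet, rowlen_pvNSet, rowlen_pvNSet]
          exact hrowlen k
        have hrows' : ∀ k : Nat, yn + 2 < k →
            (jump_right_down nb (xn : Int) (yn : Int) p).getD k [] = board.getD k [] := by
          intro k hk
          rw [hjump, getD_pvNSet_ne _ _ _ _ _ (by omega), getD_pvNSet_ne _ _ _ _ _ (by omega),
            getD_pvNSet_ne _ _ _ _ _ (by omega)]
          exact hrows k (by omega)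
        have IH := ih (jump_right_down nb (xn : Int) (yn : Int) p) (xn + 2) (yn + 2)
          hlen' hrowlen' hrows' (by omega)
        have hstep : pvALoop (f + 1) nb (xn : Int) (yn : Int) p =
            pvALoop f (jump_right_down nb (xn : Int) (yn : Int) p) ((xn : Int) + 2) ((yn : Int) + 2) p := by
          simp [pvALoop, hgl, hgr, hL, hR]
        have hsimstep : pvBSim (f + 1) board (xn : Int) (yn : Int) es [] =
            ((((xn + 1 : Nat) : Int), ((yn + 1 : Nat) : Int)) ::
                (pvBSim f board ((xn + 2 : Nat) : Int) ((yn + 2 : Nat) : Int) es []).1,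
              (pvBSim f board ((xn + 2 : Nat) : Int) ((yn + 2 : Nat) : Int) es []).2) := by
          simp only [pvBSim, hL, hR, if_true, Bool.false_eq_true, if_false]
          rw [e1, e2, e3, e4, pv_bsim_acc]
          simp
        rw [hstep, e1, e3, IH, hsimstep]
        by_cases hnil : (pvBSim f board ((xn + 2 : Nat) : Int) ((yn + 2 : Nat) : Int) es []).1 = []
        · have hxy := pv_bsim_nil f board _ _ es hnil
          simp only [pvApply, hnil, hxy, List.isEmpty_nil, if_true, List.isEmpty_cons,
            Bool.false_eq_true, if_false, List.foldl_cons, List.foldl_nil]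
          rw [hjump]
          simp only [pvSetB_natCast]
          rw [← hv]
          rw [pvNSet_comm (pvNSet nb (yn+2) (xn+2) v) (yn+1) (xn+1) yn xn "." "." (by omega)]
          rw [pvNSet_comm nb (yn+2) (xn+2) yn xn v "." (by omega)]
          rw [pvNSet_comm (pvNSet nb yn xn ".") (yn+2) (xn+2) (yn+1) (xn+1) v "." (by omega)]
        · have hne : (pvBSim f board ((xn + 2 : Nat) : Int) ((yn + 2 : Nat) : Int) es []).1.isEmpty = false := by
            cases hc : (pvBSim f board ((xn + 2 : Nat) : Int) ((yn + 2 : Nat) : Int) es []).1 with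
            | nil => exact absurd hc hnil
            | cons a l => rfl
          simp only [pvApply, hne, List.isEmpty_cons, Bool.false_eq_true, if_false,
            List.foldl_cons]
          have hrow_eq : nb.getD (yn + 2) [] = board.getD (yn + 2) [] := hrows (yn + 2) (by omega)
          have hbase : pvSetB (jump_right_down nb (xn : Int) (yn : Int) p)
                ((yn + 2 : Nat) : Int) ((xn + 2 : Nat) : Int) "." =
              pvSetB (pvSetB nb ((yn : Nat) : Int) ((xn : Nat) : Int) ".")
                ((yn + 1 : Nat) : Int) ((xn + 1 : Nat) : Int) "." := by
            rw [hjump]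
            simp only [pvSetB_natCast]
            rw [pvNSet_comm (pvNSet (pvNSet nb (yn+2) (xn+2) v) (yn+1) (xn+1) ".") yn xn
              (yn+2) (xn+2) "." "." (by omega)]
            rw [pvNSet_comm (pvNSet nb (yn+2) (xn+2) v) (yn+1) (xn+1) (yn+2) (xn+2) "." "."
              (by omega)]
            rw [pvNSet_overwrite nb (yn+2) (xn+2) v "."]
            rw [pvNSet_id nb (yn+2) (xn+2) "." (by omega)
              (by rw [hrow_eq]; rw [hsq (yn+2) hy2]; omega)
              (by
                rw [hrow_eq]
                rw [e1, e3, pvCellA_natCast] at hland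
                exact hland)]
            rw [pvNSet_comm nb (yn+1) (xn+1) yn xn "." "." (by omega)]
          rw [hbase, hlen', ← hlen]
      · -- no jump from this square: both loops stop
        have hstep : pvALoop (f + 1) nb (xn : Int) (yn : Int) p = nb := by
          simp [pvALoop, hgl, hgr, hL, hR]
        have hsim : pvBSim (f + 1) board (xn : Int) (yn : Int) es [] = ([], (xn : Int), (yn : Int)) := by
          simp [pvBSim, hL, hR]
        rw [hstep, hsim]
        simp [pvApply]

-- ===== VERDICT (by name: the statement is the Claim_ definition above) =====
theorem consecutive_jumps_down_spec : Claim_equal_consecutive_jumps_down := by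
  unfold Claim_equal_consecutive_jumps_down
  intro board x y p _hdom hpre
  unfold Spec_consecutive_jumps_down
  unfold Pre_consecutive_jumps_down at hpre
  rw [Bool.or_eq_true] at hpre
  rcases hpre with hnj | hsqr
  · -- the first feasibility checks fail safely: no jump happens on either side
    rw [Bool.and_eq_true] at hnj
    obtain ⟨hl, hr⟩ := hnj
    obtain ⟨F, hF⟩ : ∃ m, board.length + 4294967296 = m + 1 :=
      ⟨board.length + 4294967295, by omega⟩
    have hA1 := pv_leftFalse_A board x y p hl
    have hA2 := pv_rightFalse_A board x y p hr
    have hB1 := pv_leftFalse_B board x y p _ rfl hl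
    have hB2 := pv_rightFalse_B board x y p _ rfl hr
    have hloop0 : pvALoop (F + 1) board x y p = board := by
      simp [pvALoop, hA1, hA2]
    have hsim0 : pvBSim (F + 1) board x y (if p == "R" then ("b", "B") else ("r", "R")) [] =
        ([], x, y) := by
      simp only [pvBSim]
      rw [hB1, hB2]
      simp
    rw [consecutive_jumps_down, pv_alt_eq, hF, hloop0, hsim0]
    rfl
  · -- square board with the piece on the board
    simp only [Bool.and_eq_true, decide_eq_true_eq, List.all_eq_true, beq_iff_eq] at hsqr
    obtain ⟨⟨⟨⟨hsq, hx0⟩, hxn⟩, hy0⟩, hyn⟩ := hsqr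
    have hsq' : ∀ k : Nat, k < board.length → (board.getD k []).length = board.length := by
      intro k hk
      have hmem : board.getD k [] ∈ board := by
        rw [List.getD_eq_getElem board [] hk]
        exact List.getElem_mem hk
      exact hsq _ hmem
    have ex : x = ((x.toNat : Nat) : Int) := by omega
    have ey : y = ((y.toNat : Nat) : Int) := by omega
    rw [consecutive_jumps_down, pv_alt_eq, ex, ey]
    exact pv_main board p _ rfl hsq' (board.length + 4294967296) board x.toNat y.toNat rfl
      (fun _ => rfl) (fun _ _ => rfl) (by omega)
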